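-- pv_equiv track=rewrite | github.com/OTABase/OTABase | artifact/test-case-generator/rrc/rrc_utils.py | remove_sequence_of_item_name
-- ===== SOURCE A (Python) =====
-- def remove_sequence_of_item_name(field_path: list[str]) -> list[str]:
--     """ Removes the sequence of item name and indicator incase there is a seqof in a seqof
--     Indicated by a '^' and followed by the name.
--
--     Args:
--         field_path (list[str]): field path
--
--     Returns:
--         list[str]: field path without the indicator and item name
--     """
--
--     field_path = list(field_path)
--     while '^' in field_path:
--
--         index = field_path.index('^')
--         # Remove the target element
--         field_path.pop(index)
--         # Check if there is an element after the target and remove it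
--         if index < len(field_path):
--             field_path.pop(index)
--     return field_path
-- ===== SOURCE B (Python) =====
-- def remove_sequence_of_item_name(field_path: list[str]) -> list[str]:
--     """Single forward pass: drop each '^' together with the element after it."""
--     out = []
--     it = iter(field_path)
--     for x in it:
--         if x == '^':
--             next(it, None)  # skip the element following the marker, if any
--         else:
--             out.append(x)
--     return out
-- ===== Notes on version B (the rewrite author's own statement) =====
-- stated objective: idiomatic
-- what changed: Replaced the repeated 'in'/index/pop scan-and-shift loop with a single forward pass over an iterator that skips each '^' and the element after it.
import Mathlib
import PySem

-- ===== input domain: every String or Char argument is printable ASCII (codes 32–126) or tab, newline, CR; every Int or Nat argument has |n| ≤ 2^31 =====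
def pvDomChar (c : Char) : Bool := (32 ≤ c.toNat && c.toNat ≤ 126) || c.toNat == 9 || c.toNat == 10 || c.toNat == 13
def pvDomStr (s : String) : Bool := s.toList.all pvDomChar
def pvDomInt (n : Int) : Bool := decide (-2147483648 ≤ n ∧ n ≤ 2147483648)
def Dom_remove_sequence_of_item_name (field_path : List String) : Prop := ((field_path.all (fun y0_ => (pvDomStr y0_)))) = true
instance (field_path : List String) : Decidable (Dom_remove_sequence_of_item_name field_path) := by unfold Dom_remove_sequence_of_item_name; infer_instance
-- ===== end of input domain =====

-- B replaces A's repeated index/pop scan with a single forward pass that skips each '^' and the element after it (idiomatic one-pass rewrite).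
-- ===== PORT A =====
-- while '^' in field_path: index = field_path.index('^'); field_path.pop(index); if index < len(field_path): field_path.pop(index)
-- fuel = initial length: every iteration removes at least one element, so the loop runs at most that many times.
def pvALoop : Nat → List String → List String
  | 0, fp => fp
  | fuel + 1, fp =>
    if "^" ∈ fp then
      match PySem.List.index? fp "^" with
      | none => fp
      | some i =>
        match PySem.List.pop? fp (i : Int) with
        | none => fp
        | some (_, fp1) =>
          let fp2 :=
            if (i : Int) < (fp1.length : Int) then
              match PySem.List.pop? fp1 (i : Int) with
              | none => fp1
              | some (_, fp1') => fp1'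
            else fp1
          pvALoop fuel fp2
    else fp

def remove_sequence_of_item_name (field_path : List String) : List String :=
  pvALoop field_path.length field_path

-- ===== PORT B =====
def remove_sequence_of_item_name_alt : List String → List String
  | [] => []
  | x :: rest =>
    if x = "^" then
      match rest with
      | [] => []
      | _ :: t => remove_sequence_of_item_name_alt t
    else x :: remove_sequence_of_item_name_alt rest

-- ===== PRECONDITION & SPEC =====
def Spec_remove_sequence_of_item_name (field_path : List String) (out : List String) : Prop := out = remove_sequence_of_item_name_alt field_path
instance (field_path : List String) (out : List String) : Decidable (Spec_remove_sequence_of_item_name field_path out) := by unfold Spec_remove_sequence_of_item_name; infer_instance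

-- ===== CLAIM (what is proved, stated in full; the proofs are below) =====
def Claim_equal_remove_sequence_of_item_name : Prop := ∀ (field_path : List String), Dom_remove_sequence_of_item_name field_path → Spec_remove_sequence_of_item_name field_path (remove_sequence_of_item_name field_path)


-- ===== LEMMAS AND PROOFS =====
theorem alt_nil : remove_sequence_of_item_name_alt [] = [] := rfl

theorem alt_cons_ne (x : String) (rest : List String) (hx : x ≠ "^") :
    remove_sequence_of_item_name_alt (x :: rest) = x :: remove_sequence_of_item_name_alt rest := by
  conv_lhs => rw [remove_sequence_of_item_name_alt.eq_def]
  simp [hx]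

theorem alt_hat_nil : remove_sequence_of_item_name_alt ["^"] = [] := by
  conv_lhs => rw [remove_sequence_of_item_name_alt.eq_def]
  simp

theorem alt_hat_cons (y : String) (t : List String) :
    remove_sequence_of_item_name_alt ("^" :: y :: t) = remove_sequence_of_item_name_alt t := by
  conv_lhs => rw [remove_sequence_of_item_name_alt.eq_def]
  simp

theorem alt_clean_append (pre rest : List String) (h : "^" ∉ pre) :
    remove_sequence_of_item_name_alt (pre ++ rest) = pre ++ remove_sequence_of_item_name_alt rest := by
  induction pre with
  | nil => rfl
  | cons x xs ih =>
    have hx : x ≠ "^" := fun hx => h (by simp [hx])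
    have hxs : "^" ∉ xs := fun hm => h (List.mem_cons_of_mem _ hm)
    simp only [List.cons_append, alt_cons_ne x _ hx, ih hxs]

theorem alt_clean (pre : List String) (h : "^" ∉ pre) :
    remove_sequence_of_item_name_alt pre = pre := by
  have := alt_clean_append pre [] h
  simpa [alt_nil] using this

theorem eraseIdx_append_len (pre suf : List String) (x : String) :
    (pre ++ x :: suf).eraseIdx pre.length = pre ++ suf := by
  induction pre with
  | nil => rfl
  | cons y ys ih => simp [ih]

theorem pvALoop_eq_alt : ∀ (fuel : Nat) (fp : List String), fp.length ≤ fuel →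
    pvALoop fuel fp = remove_sequence_of_item_name_alt fp := by
  intro fuel
  induction fuel with
  | zero =>
    intro fp h
    have : fp = [] := List.length_eq_zero_iff.mp (Nat.le_zero.mp h)
    subst this; rfl
  | succ n ih =>
    intro fp hlen
    by_cases hm : "^" ∈ fp
    · obtain ⟨i, hi⟩ := Option.isSome_iff_exists.mp
        ((PySem.List.index?_isSome_iff fp "^").mpr hm)
      obtain ⟨pre, suf, hfp, hpl, hpre⟩ := (PySem.List.index?_eq_some_iff fp "^" i).mp hi
      have hilt : i < fp.length := by subst hfp; simp [← hpl]
      have hpop1 : PySem.List.pop? fp (i : Int) = some (fp[i], fp.eraseIdx i) :=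
        PySem.List.pop?_natCast _ _ hilt
      have herase1 : fp.eraseIdx i = pre ++ suf := by
        subst hfp; rw [← hpl]; exact eraseIdx_append_len pre suf "^"
      cases suf with
      | nil =>
        have hcond : ¬ ((i : Int) < ((pre ++ ([] : List String)).length : Int)) := by
          simp [← hpl]
        have hres : pvALoop (n+1) fp = pvALoop n (pre ++ []) := by
          simp only [pvALoop, if_pos hm, hi, hpop1, herase1, if_neg hcond]
        rw [hres]
        have hlen2 : (pre ++ ([] : List String)).length ≤ n := by
          subst hfp; simp at hlen ⊢; omega
        rw [ih _ hlen2]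
        rw [List.append_nil, alt_clean pre hpre]
        subst hfp
        rw [alt_clean_append pre ["^"] hpre, alt_hat_nil, List.append_nil]
      | cons y t =>
        have hilt2 : i < (pre ++ y :: t).length := by simp [← hpl]
        have hcond : (i : Int) < (((pre ++ y :: t)).length : Int) := by
          exact_mod_cast hilt2
        have hpop2 : PySem.List.pop? (pre ++ y :: t) (i : Int)
            = some ((pre ++ y :: t)[i], (pre ++ y :: t).eraseIdx i) :=
          PySem.List.pop?_natCast _ _ hilt2
        have herase2 : (pre ++ y :: t).eraseIdx i = pre ++ t := by
          rw [← hpl]; exact eraseIdx_append_len pre t y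
        have hres : pvALoop (n+1) fp = pvALoop n (pre ++ t) := by
          simp only [pvALoop, if_pos hm, hi, hpop1, herase1, if_pos hcond, hpop2, herase2]
        rw [hres]
        have hlen2 : (pre ++ t).length ≤ n := by
          subst hfp; simp at hlen ⊢; omega
        rw [ih _ hlen2]
        subst hfp
        rw [alt_clean_append pre ("^" :: y :: t) hpre, alt_hat_cons,
          alt_clean_append pre t hpre]
    · simp only [pvALoop, if_neg hm]
      exact (alt_clean fp hm).symm

-- ===== VERDICT (by name: the statement is the Claim_ definition above) =====
theorem remove_sequence_of_item_name_spec : Claim_equal_remove_sequence_of_item_name := by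
  intro fp _
  unfold Spec_remove_sequence_of_item_name remove_sequence_of_item_name
  exact (pvALoop_eq_alt fp.length fp (le_refl _)).symm ▸ rfl
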